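-- pv_equiv track=rewrite | github.com/SergioQuijanoRey/TFG | src/lib/loss_functions.py | precompute_negative_class
-- ===== SOURCE A (Python) =====
-- from typing import Dict, List, Optional, Tuple
--
-- def precompute_negative_class(
--     dict_of_classes: Dict[int, List[int]]
-- ) -> Dict[int, List[int]]:
--     """
--     Computes a dictionary `dict_of_negatives`. Each key i has associated a list with all the
--     indixes of elements of other class.
--
--     For example, `dict_of_negatives[4]` has all the indixes of elements whose class is not 4
--
--     @param dict_of_classes precomputed dict of positions of classes, computed using
--            `utils.precompute_dict_of_classes`
--     @returns `dict_of_negatives` a dict as described before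
--     """
--
--     # Inicializamos la lista
--     dict_of_negatives = dict()
--
--     # Iterate over all classes present in the dataset
--     # The labels are enconded as the keys of `dict_of_classes`
--     for label in dict_of_classes.keys():
--         dict_of_negatives[label] = []
--         for other_label in dict_of_classes.keys():
--             if other_label == label:
--                 continue
--
--             dict_of_negatives[label] = (
--                 dict_of_negatives[label] + dict_of_classes[other_label]
--             )
--
--     return dict_of_negatives
-- ===== SOURCE B (Python) =====
-- def precompute_negative_class(dict_of_classes):
--     """Faster exact re-implementation: one backward pass builds suffix
--     concatenations, one forward pass combines a growing prefix with the
--     precomputed suffix -- O(K*N) instead of A's repeated O(K^2*N) concatenation."""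
--     items = list(dict_of_classes.items())
--     n = len(items)
--     # suffix[i] = concatenation of the lists of items[i:], built back to front
--     suffix = [[] for _ in range(n + 1)]
--     for i in range(n - 1, -1, -1):
--         suffix[i] = items[i][1] + suffix[i + 1]
--     result = {}
--     prefix = []
--     for i in range(n):
--         label, lst = items[i]
--         result[label] = prefix + suffix[i + 1]
--         prefix = prefix + lst
--     return result
-- ===== Notes on version B (the rewrite author's own statement) =====
-- stated objective: faster
-- what changed: Replaces the nested loop over all key pairs with repeated list concatenation by one backward pass precomputing suffix concatenations plus one forward pass combining a growing prefix with the stored suffix.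
import Mathlib
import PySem

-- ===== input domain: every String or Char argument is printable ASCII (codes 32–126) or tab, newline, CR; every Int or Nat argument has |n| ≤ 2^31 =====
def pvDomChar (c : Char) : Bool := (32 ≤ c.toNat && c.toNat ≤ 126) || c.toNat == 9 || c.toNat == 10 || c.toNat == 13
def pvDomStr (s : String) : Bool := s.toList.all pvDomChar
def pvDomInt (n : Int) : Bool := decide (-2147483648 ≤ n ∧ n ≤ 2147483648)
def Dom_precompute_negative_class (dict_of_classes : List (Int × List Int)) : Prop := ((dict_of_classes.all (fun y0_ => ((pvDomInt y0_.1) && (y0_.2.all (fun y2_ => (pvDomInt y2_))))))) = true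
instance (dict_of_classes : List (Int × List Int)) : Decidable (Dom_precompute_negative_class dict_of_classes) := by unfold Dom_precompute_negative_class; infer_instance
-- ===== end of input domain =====

-- B replaces A's nested loop over all key pairs by one backward pass precomputing suffix
-- concatenations plus one forward pass with a growing prefix (objective: faster).

-- ===== PORT A =====
def precompute_negative_class (dict_of_classes : List (Int × List Int)) : List (Int × List Int) :=
  let d := PySem.Dict.mk dict_of_classes
  (d.keys.foldl
    (fun neg label =>
      d.keys.foldl
        (fun neg other =>
          if other == label then neg
          else neg.insert label (neg.getD label [] ++ d.getD other []))
        (neg.insert label []))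
    (PySem.Dict.empty : PySem.Dict Int (List Int))).items

-- ===== PORT B =====
-- pncSuffix xs = the suffix array of Source B: entry i is the concatenation of the lists of
-- xs[i:], built back to front (the backward for-loop)
def pncSuffix : List (Int × List Int) → List (List Int)
  | [] => [[]]
  | p :: rest => (p.2 ++ (pncSuffix rest).headD []) :: pncSuffix rest

-- the forward pass of Source B: growing prefix, consuming the suffix array (suffix[i+1] at item i);
-- the result dict's keys are the distinct input keys, so fresh inserts append = cons recursion
def pncLoop : List (Int × List Int) → List (List Int) → List Int → List (Int × List Int)
  | [], _, _ => []
  | p :: rest, sufs, pre => (p.1, pre ++ sufs.headD []) :: pncLoop rest sufs.tail (pre ++ p.2)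

def precompute_negative_class_alt (dict_of_classes : List (Int × List Int)) : List (Int × List Int) :=
  pncLoop dict_of_classes (pncSuffix dict_of_classes).tail []

-- ===== PRECONDITION & SPEC =====
-- The argument is a Python dict, whose keys are necessarily distinct; Pre_ excludes only the
-- association lists with duplicate keys, which encode no Python dict at all.
def Pre_precompute_negative_class (dict_of_classes : List (Int × List Int)) : Prop :=
  (dict_of_classes.map Prod.fst).Nodup

instance (dict_of_classes : List (Int × List Int)) : Decidable (Pre_precompute_negative_class dict_of_classes) := by unfold Pre_precompute_negative_class; infer_instance

def pvWitness_precompute_negative_class : (List (Int × List Int)) := [(1, [0, 1]), (2, [2]), (3, [3, 4])]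

def Spec_precompute_negative_class (dict_of_classes : List (Int × List Int)) (out : List (Int × List Int)) : Prop := out = precompute_negative_class_alt dict_of_classes
instance (dict_of_classes : List (Int × List Int)) (out : List (Int × List Int)) : Decidable (Spec_precompute_negative_class dict_of_classes out) := by unfold Spec_precompute_negative_class; infer_instance

-- ===== CLAIM (what is proved, stated in full; the proofs are below) =====
def Claim_equal_precompute_negative_class : Prop := ∀ (dict_of_classes : List (Int × List Int)), Dom_precompute_negative_class dict_of_classes → Pre_precompute_negative_class dict_of_classes → Spec_precompute_negative_class dict_of_classes (precompute_negative_class dict_of_classes)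

-- ===== LEMMAS AND PROOFS =====

-- A's inner loop only rewrites the entry at `label`, appending the other classes' lists
theorem innerA (d : PySem.Dict Int (List Int)) (label : Int) :
    ∀ (ks : List Int) (neg : PySem.Dict Int (List Int)),
    neg.contains label = true → neg.keys.Nodup →
    (ks.foldl (fun neg other =>
        if other == label then neg
        else neg.insert label (neg.getD label [] ++ d.getD other [])) neg).items
      = neg.items.map (fun p => if p.1 = label
          then (label, p.2 ++ ((ks.filter (fun o => o ≠ label)).flatMap (fun o => d.getD o [])))
          else p) := by
  intro ks
  induction ks with
  | nil =>
    intro neg h hnd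
    simp only [List.foldl_nil, List.filter_nil, List.flatMap_nil, List.append_nil]
    rw [List.map_congr_left (fun p _ => ?_), List.map_id]
    split
    · next hp => rw [← hp]; rfl
    · rfl
  | cons other ks ih =>
    intro neg h hnd
    rw [List.foldl_cons]
    by_cases ho : other = label
    · rw [if_pos (by simp [ho])]
      rw [ih neg h hnd]
      simp [ho]
    · rw [if_neg (by simp [ho])]
      rw [ih _ (by simp) (PySem.Dict.nodup_keys_insert _ _ _ hnd)]
      rw [PySem.Dict.items_insert, if_pos h]
      rw [List.map_map]
      refine List.map_congr_left (fun p hp => ?_)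
      simp only [Function.comp]
      by_cases hpl : p.1 = label
      · have hp' : (p.1, p.2) ∈ neg.items := hp
        have hv : neg.getD p.1 [] = p.2 := PySem.Dict.getD_of_mem_items _ hp' hnd []
        rw [hpl] at hv
        simp only [hpl, beq_self_eq_true, if_true, hv]
        rw [List.filter_cons, if_pos (by simp [ho])]
        simp [List.append_assoc]
      · have : (p.1 == label) = false := by simp [hpl]
        simp only [this, Bool.false_eq_true, if_false, hpl]

theorem innerA_keys (d : PySem.Dict Int (List Int)) (label : Int)
    (ks : List Int) (neg : PySem.Dict Int (List Int))
    (h : neg.contains label = true) (hnd : neg.keys.Nodup) :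
    (ks.foldl (fun neg other =>
        if other == label then neg
        else neg.insert label (neg.getD label [] ++ d.getD other [])) neg).keys
      = neg.keys := by
  simp only [PySem.Dict.keys, innerA d label ks neg h hnd, List.map_map]
  refine List.map_congr_left (fun p hp => ?_)
  by_cases hpl : p.1 = label <;> simp [hpl, Function.comp]

-- A's outer loop appends one finished entry per fresh label
theorem outerA (d : PySem.Dict Int (List Int)) :
    ∀ (ls : List Int) (neg : PySem.Dict Int (List Int)),
    neg.keys.Nodup → ls.Nodup → (∀ l ∈ ls, neg.contains l = false) →
    (ls.foldl (fun neg label =>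
        d.keys.foldl (fun neg other =>
            if other == label then neg
            else neg.insert label (neg.getD label [] ++ d.getD other []))
          (neg.insert label [])) neg).items
      = neg.items ++ ls.map (fun l =>
          (l, (d.keys.filter (fun o => o ≠ l)).flatMap (fun o => d.getD o []))) := by
  intro ls
  induction ls with
  | nil => intro neg _ _ _; simp
  | cons l ls ih =>
    intro neg hnd hls hfresh
    have hcl : neg.contains l = false := hfresh l (by simp)
    have h1 : (neg.insert l []).contains l = true := PySem.Dict.contains_insert_self _ _ _
    have hnd1 : (neg.insert l []).keys.Nodup := PySem.Dict.nodup_keys_insert _ _ _ hnd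
    rw [List.foldl_cons]
    have hRitems := innerA d l d.keys (neg.insert l []) h1 hnd1
    have hRkeys := innerA_keys d l d.keys (neg.insert l []) h1 hnd1
    have hkeys1 : (neg.insert l []).keys = neg.keys ++ [l] :=
      PySem.Dict.keys_insert_of_not_contains _ _ hcl
    have hlnot : l ∉ neg.keys := by
      intro hm
      rw [(PySem.Dict.contains_iff_mem_keys _ _).mpr hm] at hcl
      exact Bool.true_eq_false.mp hcl
    rw [ih _ (by rw [hRkeys]; exact hnd1)
          (List.Nodup.of_cons hls)
          (fun l' hl' => by
            have hne : l' ≠ l := by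
              rintro rfl
              exact (List.nodup_cons.mp hls).1 hl'
            rw [PySem.Dict.contains_eq_decide_mem_keys, hRkeys, hkeys1]
            simp only [List.mem_append, List.mem_singleton, decide_eq_false_iff_not]
            rintro (hm | rfl)
            · have := hfresh l' (by simp [hl'])
              rw [(PySem.Dict.contains_iff_mem_keys _ _).mpr hm] at this
              exact Bool.true_eq_false.mp this
            · exact hne rfl)]
    rw [hRitems]
    rw [PySem.Dict.items_insert, if_neg (by simp [hcl])]
    rw [List.map_append]
    have hmapid : neg.items.map (fun p => if p.1 = l
        then (l, p.2 ++ (d.keys.filter (fun o => o ≠ l)).flatMap (fun o => d.getD o []))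
        else p) = neg.items := by
      refine (List.map_congr_left fun p hp => ?_).trans (List.map_id _)
      have hmem : p.1 ∈ neg.keys := PySem.Dict.mem_keys_of_mem_items _ hp
      rw [if_neg (fun hpl => hlnot (by rw [hpl] at hmem; exact hmem))]
      rfl
    rw [hmapid]
    simp [List.append_assoc]

theorem pncSuffix_headD (xs : List (Int × List Int)) :
    (pncSuffix xs).headD [] = xs.flatMap Prod.snd := by
  induction xs with
  | nil => rfl
  | cons p rest ih => simpa [pncSuffix, List.headD_eq_head?_getD] using ih

theorem pncItems_mk (xs : List (Int × List Int)) : (PySem.Dict.mk xs).items = xs :=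
  List.toList_toArray

theorem pncKeys_mk (xs : List (Int × List Int)) :
    (PySem.Dict.mk xs).keys = xs.map Prod.fst := by
  simp [PySem.Dict.keys]

theorem pncGetD_mem (zs : List (Int × List Int)) (hnd : (zs.map Prod.fst).Nodup)
    (p : Int × List Int) (hp : p ∈ zs) :
    (PySem.Dict.mk zs).getD p.1 [] = p.2 := by
  have hp' : (p.1, p.2) ∈ (PySem.Dict.mk zs).items := by rw [pncItems_mk]; exact hp
  exact PySem.Dict.getD_of_mem_items _ hp' (by rw [pncKeys_mk]; exact hnd) []

theorem pncFlatMap_getD (zs : List (Int × List Int)) (hnd : (zs.map Prod.fst).Nodup) :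
    ∀ ps : List (Int × List Int), (∀ p ∈ ps, p ∈ zs) →
    (ps.map Prod.fst).flatMap (fun o => (PySem.Dict.mk zs).getD o []) = ps.flatMap Prod.snd := by
  intro ps
  induction ps with
  | nil => intro _; rfl
  | cons p ps ih =>
    intro hsub
    simp only [List.map_cons, List.flatMap_cons]
    rw [pncGetD_mem zs hnd p (hsub p (by simp)), ih (fun q hq => hsub q (by simp [hq]))]

theorem pncFilter_keys (ys rest : List (Int × List Int)) (l : Int) (v : List Int)
    (hnd : (((ys ++ (l, v) :: rest).map Prod.fst)).Nodup) :
    ((ys ++ (l, v) :: rest).map Prod.fst).filter (fun o => o ≠ l)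
      = ys.map Prod.fst ++ rest.map Prod.fst := by
  simp only [List.map_append, List.map_cons] at hnd ⊢
  have h1 : l ∉ ys.map Prod.fst := by
    intro hm
    exact (List.disjoint_of_nodup_append hnd) hm (by simp)
  have h2 : l ∉ rest.map Prod.fst := by
    have := (List.nodup_append.mp hnd).2.1
    exact (List.nodup_cons.mp this).1
  rw [List.filter_append, List.filter_cons]
  rw [if_neg (by simp)]
  rw [List.filter_eq_self.mpr (fun a ha => by simp; rintro rfl; exact h1 ha),
      List.filter_eq_self.mpr (fun a ha => by simp; rintro rfl; exact h2 ha)]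

-- the negatives of class l are exactly prefix-concatenation ++ suffix-concatenation
theorem pncGsplit (ys rest : List (Int × List Int)) (l : Int) (v : List Int)
    (zs : List (Int × List Int)) (hz : zs = ys ++ (l, v) :: rest)
    (hnd : (zs.map Prod.fst).Nodup) :
    ((zs.map Prod.fst).filter (fun o => o ≠ l)).flatMap (fun o => (PySem.Dict.mk zs).getD o [])
      = ys.flatMap Prod.snd ++ rest.flatMap Prod.snd := by
  subst hz
  rw [pncFilter_keys ys rest l v hnd, ← List.map_append]
  rw [pncFlatMap_getD _ hnd (ys ++ rest) (by
    intro p hp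
    rcases List.mem_append.mp hp with h | h
    · exact List.mem_append.mpr (Or.inl h)
    · exact List.mem_append.mpr (Or.inr (by simp [h])))]
  rw [List.flatMap_append]

theorem pncBridge (zs : List (Int × List Int)) (hnd : (zs.map Prod.fst).Nodup) :
    ∀ (xs ys : List (Int × List Int)), zs = ys ++ xs →
    xs.map (fun p => (p.1,
        ((zs.map Prod.fst).filter (fun o => o ≠ p.1)).flatMap
          (fun o => (PySem.Dict.mk zs).getD o [])))
      = pncLoop xs (pncSuffix xs).tail (ys.flatMap Prod.snd) := by
  intro xs
  induction xs with
  | nil => intro ys _; rfl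
  | cons p xs ih =>
    intro ys hz
    have hsuf : (pncSuffix (p :: xs)).tail = pncSuffix xs := rfl
    rw [hsuf]
    simp only [List.map_cons, pncLoop]
    rw [pncSuffix_headD xs]
    rw [pncGsplit ys xs p.1 p.2 zs (by simpa using hz) hnd]
    rw [ih (ys ++ [p]) (by rw [hz]; simp)]
    have : (ys ++ [p]).flatMap Prod.snd = ys.flatMap Prod.snd ++ p.2 := by simp
    rw [this]

-- ===== VERDICT (by name: the statement is the Claim_ definition above) =====
theorem precompute_negative_class_spec : Claim_equal_precompute_negative_class := by
  intro xs _ hpre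
  unfold Spec_precompute_negative_class
  simp only [precompute_negative_class, precompute_negative_class_alt]
  have hndk : ((PySem.Dict.mk xs).keys).Nodup := by rw [pncKeys_mk]; exact hpre
  rw [outerA (PySem.Dict.mk xs) (PySem.Dict.mk xs).keys PySem.Dict.empty
        (by simp [PySem.Dict.keys, PySem.Dict.empty]) hndk
        (fun l _ => by simp)]
  rw [pncKeys_mk, List.map_map]
  have := pncBridge xs hpre xs [] rfl
  simp only [List.flatMap_nil] at this
  simpa only [ne_eq, decide_not, PySem.Dict.empty, Function.comp_def, List.nil_append] using this
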